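-- pv_equiv track=rewrite | github.com/liskos/ovsynnikov | zadanie_15/43.py | func
-- ===== SOURCE A (Python) =====
-- def func(a):
--     p = list(range(5, 10+1))
--     q = list(range(15, 18+1))
--     for x in range(-100, 100):
--         f = ((x not in a) or (x in p)) or (x in q)
--         if not f:
--             return False
--     return True
-- ===== SOURCE B (Python) =====
-- def func(a):
--     allowed = set(range(5, 11)) | set(range(15, 19))
--     return set(a) & set(range(-100, 100)) <= allowed
-- ===== Notes on version B (the rewrite author's own statement) =====
-- stated objective: idiomatic
-- what changed: B replaces A's scan of the fixed 200-value range with an inner membership scan of a by set algebra: the distinct in-range elements of a (set(a) & set(range(-100,100))) must be a subset of the allowed set {5..10} | {15..18}.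
import Mathlib
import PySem

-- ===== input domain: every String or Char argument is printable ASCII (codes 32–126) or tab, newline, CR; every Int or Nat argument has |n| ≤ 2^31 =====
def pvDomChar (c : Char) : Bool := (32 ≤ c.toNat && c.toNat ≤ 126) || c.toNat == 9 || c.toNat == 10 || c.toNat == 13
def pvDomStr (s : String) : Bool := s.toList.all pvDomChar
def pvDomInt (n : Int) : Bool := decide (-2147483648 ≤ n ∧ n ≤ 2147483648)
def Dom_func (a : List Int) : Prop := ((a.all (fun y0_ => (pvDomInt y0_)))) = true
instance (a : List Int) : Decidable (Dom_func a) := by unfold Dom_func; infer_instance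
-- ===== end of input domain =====

-- B replaces A's scan of the fixed 200-value range (inner membership scan of `a` each step)
-- by set algebra: the in-range distinct elements of `a` must be a subset of the allowed set.

-- ===== PORT A =====
-- the for-loop over range(-100,100) with early return False
def funcLoopA (a p q : List Int) : List Int → Bool
  | [] => true
  | x :: xs =>
    let f := ((!(a.contains x)) || p.contains x) || q.contains x
    if !f then false else funcLoopA a p q xs

def func (a : List Int) : Bool :=
  let p := PySem.List.pyRange 5 (10 + 1) 1
  let q := PySem.List.pyRange 15 (18 + 1) 1
  funcLoopA a p q (PySem.List.pyRange (-100) 100 1)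

-- ===== PORT B =====
def func_alt (a : List Int) : Bool :=
  let allowed := PySem.Set.union (PySem.Set.ofList (PySem.List.pyRange 5 11 1))
                                 (PySem.Set.ofList (PySem.List.pyRange 15 19 1))
  PySem.Set.issubset
    (PySem.Set.inter (PySem.Set.ofList a) (PySem.Set.ofList (PySem.List.pyRange (-100) 100 1)))
    allowed

-- ===== PRECONDITION & SPEC =====
def Spec_func (a : List Int) (out : Bool) : Prop := out = func_alt a
instance (a : List Int) (out : Bool) : Decidable (Spec_func a out) := by unfold Spec_func; infer_instance

-- ===== CLAIM (what is proved, stated in full; the proofs are below) =====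
def Claim_equal_func : Prop := ∀ (a : List Int), Dom_func a → Spec_func a (func a)

-- ===== LEMMAS AND PROOFS =====

-- A's early-return loop is List.all of its per-element test
theorem funcLoopA_eq_all (a p q l : List Int) :
    funcLoopA a p q l = l.all (fun x => ((!(a.contains x)) || p.contains x) || q.contains x) := by
  induction l with
  | nil => rfl
  | cons x xs ih =>
    simp only [funcLoopA, List.all_cons, ih]
    by_cases h : (((!(a.contains x)) || p.contains x) || q.contains x) = true <;> simp_all

-- ===== VERDICT (by name: the statement is the Claim_ definition above) =====
theorem func_spec : Claim_equal_func := by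
  intro a _
  unfold Spec_func func func_alt
  simp only [funcLoopA_eq_all]
  rw [Bool.eq_iff_iff]
  simp only [List.all_eq_true, PySem.Set.issubset_iff, PySem.Set.mem_inter,
    PySem.Set.mem_union, PySem.Set.mem_ofList, PySem.List.mem_pyRange_one,
    List.contains_eq_mem]
  constructor
  · rintro h x ⟨hxa, hxr⟩
    have := h x hxr
    simp [hxa] at this
    omega
  · intro h x hx
    by_cases hm : x ∈ a
    · have := h x ⟨hm, hx⟩
      simp [hm]
      omega
    · simp [hm]
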